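-- pv_equiv track=rewrite | github.com/kausaltech/kausal-backend-common | testing/utils.py | _highlight_cell_in_line
-- ===== SOURCE A (Python) =====
-- def _highlight_cell_in_line(line: str, cell_index: int) -> str:
--     parts = line.split()
--     if cell_index >= len(parts):
--         return line
--     target = parts[cell_index]
--     pos = 0
--     for i, part in enumerate(parts):
--         pos = line.find(part, pos)
--         if i == cell_index:
--             highlight = ' ' * pos + '^' * len(target)
--             return f'{line}\n{highlight}'
--         pos += len(part)
--     return line
-- ===== SOURCE B (Python) =====
-- def _highlight_cell_in_line(line: str, cell_index: int) -> str:
--     count = 0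
--     in_word = False
--     start = None
--     for i, ch in enumerate(line):
--         if ch.isspace():
--             if in_word and start is not None:
--                 return f'{line}\n' + ' ' * start + '^' * (i - start)
--             in_word = False
--         else:
--             if not in_word:
--                 if count == cell_index:
--                     start = i
--                 count += 1
--             in_word = True
--     if start is not None:
--         return f'{line}\n' + ' ' * start + '^' * (len(line) - start)
--     return line
-- ===== Notes on version B (the rewrite author's own statement) =====
-- stated objective: alternative
-- what changed: Replaced split()-plus-repeated-find() over the word list by a single left-to-right character scan that counts word starts and underlines the cell_index-th word in one pass.
-- crash fix: On cell_index < -len(line.split()) A raises IndexError (negative list index out of range); B returns line unchanged. — e.g. on _highlight_cell_in_line("ab", -2): A raises IndexError, B returns "ab"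
import Mathlib
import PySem

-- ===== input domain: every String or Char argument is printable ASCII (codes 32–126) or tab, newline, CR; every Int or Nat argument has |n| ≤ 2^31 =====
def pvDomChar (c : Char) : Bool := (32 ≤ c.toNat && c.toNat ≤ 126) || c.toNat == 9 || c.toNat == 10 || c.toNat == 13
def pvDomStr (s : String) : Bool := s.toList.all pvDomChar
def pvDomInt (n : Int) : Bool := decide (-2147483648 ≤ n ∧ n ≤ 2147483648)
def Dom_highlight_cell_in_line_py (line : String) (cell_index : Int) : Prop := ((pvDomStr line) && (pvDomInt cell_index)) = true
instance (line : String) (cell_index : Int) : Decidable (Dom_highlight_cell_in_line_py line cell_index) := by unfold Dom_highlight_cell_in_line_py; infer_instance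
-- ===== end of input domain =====

-- B replaces A's split()+repeated find() by a single left-to-right character scan; return values agree, no argument is mutated.

-- ===== PORT A =====
-- the 'for i, part in enumerate(parts)' loop of A: state (remaining parts, i, pos)
def pvFindLoop (line : String) (k : Int) (target : String) :
    List String → Int → Int → String
  | [], _, _ => line
  | part :: rest, i, pos =>
      let pos' := PySem.Str.findFrom line part pos
      if i == k then
        String.ofList (line.toList ++ '\n' ::
          (List.replicate pos'.toNat ' ' ++ List.replicate (PySem.Str.len target).toNat '^'))
      else pvFindLoop line k target rest (i + 1) (pos' + PySem.Str.len part)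

def highlight_cell_in_line_py (line : String) (cell_index : Int) : String :=
  let parts := PySem.Str.split₀ line
  if cell_index ≥ (parts.length : Int) then line
  else
    match PySem.List.pyGet? parts cell_index with
    | none => line   -- Python raises IndexError here; excluded by Pre_
    | some target => pvFindLoop line cell_index target parts 0 0

-- ===== PORT B =====
-- the 'for i, ch in enumerate(line)' scan of B: state (remaining chars, i, count, in_word, start)
def pvBLoop (line : String) (k : Int) :
    List Char → Nat → Int → Bool → Option Nat → String
  | [], _, _, _, start =>
      match start with
      | some s => String.ofList (line.toList ++ '\n' ::
          (List.replicate s ' ' ++ List.replicate (line.toList.length - s) '^'))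
      | none => line
  | ch :: rest, i, count, inWord, start =>
      if PySem.Chars.isspace ch = true then
        match start with
        | some s =>
          if inWord then
            String.ofList (line.toList ++ '\n' ::
              (List.replicate s ' ' ++ List.replicate (i - s) '^'))
          else pvBLoop line k rest (i + 1) count false (some s)
        | none => pvBLoop line k rest (i + 1) count false none
      else
        if inWord then pvBLoop line k rest (i + 1) count true start
        else pvBLoop line k rest (i + 1) (count + 1) true
               (if count == k then some i else start)

def highlight_cell_in_line_py_alt (line : String) (cell_index : Int) : String :=
  pvBLoop line cell_index line.toList 0 0 false none

-- ===== PRECONDITION & SPEC =====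
-- Pre_ excludes exactly the inputs where A raises IndexError: cell_index < -(number of whitespace-separated words).
def Pre_highlight_cell_in_line_py (line : String) (cell_index : Int) : Prop :=
  -((PySem.Chars.split₀ line.toList).length : Int) ≤ cell_index
instance (line : String) (cell_index : Int) : Decidable (Pre_highlight_cell_in_line_py line cell_index) := by unfold Pre_highlight_cell_in_line_py; infer_instance

def pvWitness_highlight_cell_in_line_py : String × Int := ("ab  cd e", 1)

-- On cell_index < -len(line.split()) A raises IndexError (negative list index out of range); B returns line unchanged.
def Raises_highlight_cell_in_line_py (line : String) (cell_index : Int) : Prop :=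
  cell_index < -((PySem.Chars.split₀ line.toList).length : Int)
instance (line : String) (cell_index : Int) : Decidable (Raises_highlight_cell_in_line_py line cell_index) := by unfold Raises_highlight_cell_in_line_py; infer_instance
def pvRaiseWitness_highlight_cell_in_line_py : String × Int := ("ab", -2)
def pvRaiseWitnessOut_highlight_cell_in_line_py : String := "ab"

def Spec_highlight_cell_in_line_py (line : String) (cell_index : Int) (out : String) : Prop := out = highlight_cell_in_line_py_alt line cell_index
instance (line : String) (cell_index : Int) (out : String) : Decidable (Spec_highlight_cell_in_line_py line cell_index out) := by unfold Spec_highlight_cell_in_line_py; infer_instance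

-- ===== CLAIM (what is proved, stated in full; the proofs are below) =====
def Claim_equal_highlight_cell_in_line_py : Prop := ∀ (line : String) (cell_index : Int), Dom_highlight_cell_in_line_py line cell_index → Pre_highlight_cell_in_line_py line cell_index → Spec_highlight_cell_in_line_py line cell_index (highlight_cell_in_line_py line cell_index)
def Claim_raises_highlight_cell_in_line_py : Prop := (∀ (line : String) (cell_index : Int), Dom_highlight_cell_in_line_py line cell_index → Raises_highlight_cell_in_line_py line cell_index → ¬ Pre_highlight_cell_in_line_py line cell_index) ∧ (Dom_highlight_cell_in_line_py (pvRaiseWitness_highlight_cell_in_line_py.1) (pvRaiseWitness_highlight_cell_in_line_py.2) ∧ Raises_highlight_cell_in_line_py (pvRaiseWitness_highlight_cell_in_line_py.1) (pvRaiseWitness_highlight_cell_in_line_py.2) ∧ highlight_cell_in_line_py_alt (pvRaiseWitness_highlight_cell_in_line_py.1) (pvRaiseWitness_highlight_cell_in_line_py.2) = pvRaiseWitnessOut_highlight_cell_in_line_py)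

-- ===== LEMMAS AND PROOFS =====

-- not-a-space, as a Bool predicate on characters
def pvNonSp (c : Char) : Bool := !PySem.Chars.isspace c

-- the (start index, word) tokens of cs, cs being the suffix of the line starting at index i
def pvTokens : List Char → Nat → List (Nat × List Char)
  | [], _ => []
  | c :: rest, i =>
    if PySem.Chars.isspace c = true then pvTokens rest (i + 1)
    else (i, c :: rest.takeWhile pvNonSp) ::
         pvTokens (rest.dropWhile pvNonSp) (i + 1 + (rest.takeWhile pvNonSp).length)
termination_by cs => cs.length
decreasing_by
  all_goals simp only [List.length_cons]
  all_goals have := List.length_dropWhile_le (p := pvNonSp) (l := rest)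
  all_goals omega

-- the words of cs (what str.split() returns)
def pvWords : List Char → List (List Char)
  | [] => []
  | c :: rest =>
    if PySem.Chars.isspace c = true then pvWords rest
    else (c :: rest.takeWhile pvNonSp) :: pvWords (rest.dropWhile pvNonSp)
termination_by cs => cs.length
decreasing_by
  all_goals simp only [List.length_cons]
  all_goals have := List.length_dropWhile_le (p := pvNonSp) (l := rest)
  all_goals omega

-- geometric invariant of a token list against the full line L
def TokOK (L : List Char) : Nat → List (Nat × List Char) → Prop
  | _, [] => True
  | pos, (s, w) :: ts =>
      pos ≤ s ∧ s + w.length ≤ L.length ∧ w ≠ [] ∧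
      (∀ c ∈ w, PySem.Chars.isspace c = false) ∧
      w <+: L.drop s ∧
      (∀ j, pos ≤ j → j < s → PySem.Chars.isspace (L.getD j ' ') = true) ∧
      TokOK L (s + w.length) ts

-- the underline output both loops produce for a word starting at s with n characters
def pvOut (line : String) (s : Nat) (n : Nat) : String :=
  String.ofList (line.toList ++ '\n' :: (List.replicate s ' ' ++ List.replicate n '^'))

theorem tokens_map_snd (cs : List Char) (i : Nat) :
    (pvTokens cs i).map Prod.snd = pvWords cs := by
  induction cs, i using pvTokens.induct with
  | case1 => simp [pvTokens, pvWords]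
  | case2 c rest i h ih => simp [pvTokens, pvWords, h, ih]
  | case3 c rest i h ih => simp [pvTokens, pvWords, h, ih]

theorem go_eq (cs : List Char) : ∀ cur acc,
    PySem.Chars.split₀.go cs cur acc =
      acc.reverse ++ (if cur.isEmpty then pvWords cs
        else (cur.reverse ++ cs.takeWhile pvNonSp) :: pvWords (cs.dropWhile pvNonSp)) := by
  induction cs with
  | nil =>
    intro cur acc
    cases cur with
    | nil => simp [PySem.Chars.split₀.go, pvWords]
    | cons a b => simp [PySem.Chars.split₀.go, pvWords]
  | cons c rest ih =>
    intro cur acc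
    by_cases h : PySem.Chars.isspace c = true
    · cases cur with
      | nil => simp [PySem.Chars.split₀.go, h, ih, pvWords]
      | cons a b => simp [PySem.Chars.split₀.go, h, ih, pvWords, pvNonSp]
    · cases cur with
      | nil => simp [PySem.Chars.split₀.go, h, ih, pvWords]
      | cons a b => simp [PySem.Chars.split₀.go, h, ih, pvNonSp]

theorem split₀_eq_words (cs : List Char) : PySem.Chars.split₀ cs = pvWords cs := by
  simp [PySem.Chars.split₀, go_eq]

theorem drop_succ_of_cons (L : List Char) (c : Char) (rest : List Char) (i : Nat)
    (h : c :: rest = L.drop i) : rest = L.drop (i + 1) := by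
  have h2 : L.drop (i + 1) = (L.drop i).drop 1 := by rw [List.drop_drop]
  rw [h2, ← h]; simp

theorem tokOK_weaken (L : List Char) (pos : Nat) (ts : List (Nat × List Char))
    (hsp : PySem.Chars.isspace (L.getD pos ' ') = true)
    (h : TokOK L (pos + 1) ts) : TokOK L pos ts := by
  cases ts with
  | nil => trivial
  | cons t ts =>
    obtain ⟨s, w⟩ := t
    obtain ⟨h1, h2, h3, h4, h5, h6, h7⟩ := h
    refine ⟨by omega, h2, h3, h4, h5, ?_, h7⟩
    intro j hj1 hj2
    rcases Nat.eq_or_lt_of_le hj1 with rfl | hlt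
    · exact hsp
    · exact h6 j hlt hj2

theorem tokOK_of_drop (L : List Char) :
    ∀ cs pos, cs = L.drop pos → TokOK L pos (pvTokens cs pos) := by
  intro cs pos
  induction cs, pos using pvTokens.induct with
  | case1 i => intro h; rw [pvTokens]; trivial
  | case2 c rest i hsp ih =>
    intro h
    rw [pvTokens, if_pos hsp]
    have hrest : rest = L.drop (i + 1) := drop_succ_of_cons L c rest i h
    refine tokOK_weaken L i _ ?_ (ih hrest)
    have hh : (L.drop i).head? = some c := by rw [← h]; rfl
    rw [List.head?_drop] at hh
    have : L.getD i ' ' = c := by simp [List.getD, hh]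
    rw [this]; exact hsp
  | case3 c rest i hsp ih =>
    intro h
    rw [pvTokens, if_neg hsp]
    have hrest : rest = L.drop (i + 1) := drop_succ_of_cons L c rest i h
    have htw : (rest.takeWhile pvNonSp).length ≤ rest.length :=
      (List.takeWhile_prefix pvNonSp (l := rest)).length_le
    have hdrop' : rest.dropWhile pvNonSp = L.drop (i + 1 + (rest.takeWhile pvNonSp).length) := by
      have h2 : L.drop (i + 1 + (rest.takeWhile pvNonSp).length) = rest.drop (rest.takeWhile pvNonSp).length := by
        rw [← List.drop_drop (i := (rest.takeWhile pvNonSp).length) (j := i + 1), ← hrest]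
      rw [h2]
      conv_lhs => rw [← List.drop_left (l₁ := rest.takeWhile pvNonSp) (l₂ := rest.dropWhile pvNonSp)]
      rw [List.takeWhile_append_dropWhile]
    have hrl : rest.length = L.length - (i + 1) := by rw [hrest, List.length_drop]
    have hile : i < L.length := by
      by_contra hx
      have hz : L.drop i = [] := List.drop_eq_nil_of_le (by omega)
      rw [← h] at hz; simp at hz
    refine ⟨le_refl i, ?_, by simp, ?_, ?_, ?_, ?_⟩
    · simp only [List.length_cons]; omega
    · intro d hd
      rcases List.mem_cons.mp hd with rfl | hd'
      · by_contra hx; simp at hx; exact hsp hx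
      · have := List.mem_takeWhile_imp hd'
        simpa [pvNonSp] using this
    · rw [← h]
      exact List.cons_prefix_cons.mpr ⟨rfl, List.takeWhile_prefix _⟩
    · intro j hj1 hj2; omega
    · have := ih hdrop'
      simpa [List.length_cons, Nat.add_assoc, Nat.add_comm, Nat.add_left_comm] using this

theorem findFrom_eq_start (L w : List Char) (pos s : Nat)
    (hps : pos ≤ s) (hpre : w <+: L.drop s) (hw : w ≠ [])
    (hns : ∀ c ∈ w, PySem.Chars.isspace c = false)
    (hgap : ∀ j, pos ≤ j → j < s → PySem.Chars.isspace (L.getD j ' ') = true) :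
    PySem.Chars.findFrom L w (pos : Int) none = (s : Int) := by
  have hslen : s < L.length := by
    by_contra hx
    have hz : L.drop s = [] := List.drop_eq_nil_of_le (by omega)
    rw [hz, List.prefix_nil] at hpre
    exact hw hpre
  have hk : pos ≤ L.length := by omega
  have hnogap : ∀ j, pos ≤ j → j < s → ¬ w <+: L.drop j := by
    intro j hj1 hj2 hocc
    obtain ⟨c, w', rfl⟩ := List.exists_cons_of_ne_nil hw
    have hh : (L.drop j).head? = some c := by
      obtain ⟨t, ht⟩ := hocc
      rw [← ht]; rfl
    rw [List.head?_drop] at hh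
    have hc : L.getD j ' ' = c := by simp [List.getD, hh]
    have := hgap j hj1 hj2
    rw [hc] at this
    have hcns := hns c List.mem_cons_self
    rw [this] at hcns; exact Bool.true_eq_false.mp hcns
  have hinf : w <:+: L.drop pos := by
    have h1 : L.drop s = (L.drop pos).drop (s - pos) := by
      rw [List.drop_drop]; congr 1; omega
    rw [h1] at hpre
    exact hpre.isInfix.trans (List.drop_suffix _ _).isInfix
  have hne : PySem.Chars.findFrom L w (pos : Int) none ≠ -1 := by
    intro hx
    exact ((PySem.Chars.findFrom_natCast_eq_neg_one_iff L w pos hk).mp hx) hinf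
  obtain ⟨h1, h2, h3⟩ := PySem.Chars.findFrom_natCast_spec L w pos hk hne
  set r := PySem.Chars.findFrom L w (pos : Int) none with hr
  have hge : s ≤ r.toNat := by
    by_contra hx
    exact hnogap r.toNat (by omega) (by omega) h2
  have hle : r.toNat ≤ s := by
    by_contra hx
    exact h3 s hps (by omega) hpre
  omega

theorem aLoop_eq (line : String) (k : Int) (target : String) :
    ∀ ts pos (i : Int), TokOK line.toList pos ts →
      pvFindLoop line k target (ts.map fun p => String.ofList p.2) i (pos : Int) =
        if 0 ≤ k - i ∧ (k - i).toNat < ts.length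
        then pvOut line (ts.getD (k - i).toNat (0, [])).1 (PySem.Str.len target).toNat
        else line := by
  intro ts
  induction ts with
  | nil =>
    intro pos i _
    have hc : ¬ (0 ≤ k - i ∧ (k - i).toNat < ([] : List (Nat × List Char)).length) := by
      simp
    rw [List.map_nil, pvFindLoop, if_neg hc]
  | cons t ts' ih =>
    intro pos i hok
    obtain ⟨s, w⟩ := t
    obtain ⟨h1, h2, h3, h4, h5, h6, h7⟩ := hok
    have hfind : PySem.Str.findFrom line (String.ofList w) (pos : Int) = (s : Int) := by
      show PySem.Chars.findFrom line.toList (String.ofList w).toList _ _ = _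
      rw [String.toList_ofList]
      exact findFrom_eq_start line.toList w pos s h1 h5 h3 h4 h6
    rw [List.map_cons, pvFindLoop]
    simp only [hfind]
    by_cases hik : i = k
    · rw [if_pos (by simp [hik])]
      have hc : 0 ≤ k - i ∧ (k - i).toNat < ((s, w) :: ts').length := by
        constructor
        · omega
        · simp [hik]
      rw [if_pos hc, hik, pvOut]
      simp
    · rw [if_neg (by simp [hik])]
      have hlen : PySem.Str.len (String.ofList w) = (w.length : Int) := by
        simp [PySem.Str.len]
      have hcast : (s : Int) + PySem.Str.len (String.ofList w) = ((s + w.length : Nat) : Int) := by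
        rw [hlen]; push_cast; ring
      rw [hcast, ih (s + w.length) (i + 1) h7]
      by_cases hc : 0 ≤ k - (i + 1) ∧ (k - (i + 1)).toNat < ts'.length
      · rw [if_pos hc]
        have hc2 : 0 ≤ k - i ∧ (k - i).toNat < ((s, w) :: ts').length := by
          simp only [List.length_cons]; omega
        rw [if_pos hc2]
        have hidx : (k - i).toNat = (k - (i + 1)).toNat + 1 := by omega
        rw [hidx, List.getD_cons_succ]
      · rw [if_neg hc]
        have hc2 : ¬ (0 ≤ k - i ∧ (k - i).toNat < ((s, w) :: ts').length) := by
          simp only [List.length_cons]; omega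
        rw [if_neg hc2]

theorem scanSkip (line : String) (k : Int) :
    ∀ (w' : List Char) (tail : List Char) (i : Nat) (count : Int),
      (∀ c ∈ w', PySem.Chars.isspace c = false) →
      pvBLoop line k (w' ++ tail) i count true none =
        pvBLoop line k tail (i + w'.length) count true none := by
  intro w'
  induction w' with
  | nil => intro tail i count _; simp
  | cons c w'' ih =>
    intro tail i count hw
    have hc : ¬ PySem.Chars.isspace c = true := by
      have := hw c List.mem_cons_self; simp [this]
    rw [List.cons_append, pvBLoop, if_neg hc, if_pos rfl]
    rw [ih tail (i + 1) count (fun d hd => hw d (List.mem_cons_of_mem c hd))]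
    congr 1
    simp only [List.length_cons]; omega

theorem scanWord (line : String) (k : Int) :
    ∀ (w' : List Char) (tail : List Char) (i : Nat) (count : Int) (s : Nat),
      (∀ c ∈ w', PySem.Chars.isspace c = false) →
      w' ++ tail = line.toList.drop i → i ≤ line.toList.length →
      (tail = [] ∨ ∃ d t', tail = d :: t' ∧ PySem.Chars.isspace d = true) →
      pvBLoop line k (w' ++ tail) i count true (some s) =
        pvOut line s ((i + w'.length) - s) := by
  intro w'
  induction w' with
  | nil =>
    intro tail i count s _ h hi htail
    rcases htail with rfl | ⟨d, t', rfl, hd⟩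
    · have hlen : line.toList.length = i := by
        have hz : line.toList.drop i = [] := by rw [← h]; rfl
        have := List.drop_eq_nil_iff.mp hz
        omega
      rw [List.nil_append, pvBLoop, pvOut, hlen]; simp
    · rw [List.nil_append, pvBLoop, if_pos hd, if_pos rfl, pvOut]; simp
  | cons c w'' ih =>
    intro tail i count s hw h hi htail
    have hc : ¬ PySem.Chars.isspace c = true := by
      have := hw c List.mem_cons_self; simp [this]
    have hlt : i < line.toList.length := by
      by_contra hx
      have hz : line.toList.drop i = [] := List.drop_eq_nil_of_le (by omega)
      rw [← h] at hz; simp at hz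
    rw [List.cons_append, pvBLoop, if_neg hc, if_pos rfl]
    rw [ih tail (i + 1) count s (fun d hd => hw d (List.mem_cons_of_mem c hd))
        (drop_succ_of_cons _ _ _ _ h) (by omega) htail]
    congr 1
    simp only [List.length_cons]; omega

theorem boundary (line : String) (k : Int) (tail : List Char) (j : Nat) (c : Int)
    (htail : tail = [] ∨ ∃ d t', tail = d :: t' ∧ PySem.Chars.isspace d = true) :
    pvBLoop line k tail j c true none = pvBLoop line k tail j c false none := by
  rcases htail with rfl | ⟨d, t', rfl, hd⟩
  · rfl
  · rw [pvBLoop, pvBLoop, if_pos hd, if_pos hd]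

theorem bLoop_eq (line : String) (k : Int) :
    ∀ cs pos, cs = line.toList.drop pos → ∀ (count : Int),
      pvBLoop line k cs pos count false none =
        if 0 ≤ k - count ∧ (k - count).toNat < (pvTokens cs pos).length
        then pvOut line ((pvTokens cs pos).getD (k - count).toNat (0, [])).1
               ((pvTokens cs pos).getD (k - count).toNat (0, [])).2.length
        else line := by
  intro cs pos
  induction cs, pos using pvTokens.induct with
  | case1 i =>
    intro _ count
    rw [pvTokens]
    have hc : ¬ (0 ≤ k - count ∧ (k - count).toNat < ([] : List (Nat × List Char)).length) := by
      simp
    rw [if_neg hc, pvBLoop]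
  | case2 c rest i hsp ih =>
    intro h count
    rw [pvBLoop, if_pos hsp, pvTokens, if_pos hsp]
    exact ih (drop_succ_of_cons _ _ _ _ h) count
  | case3 c rest i hsp ih =>
    intro h count
    have hrest : rest = line.toList.drop (i + 1) := drop_succ_of_cons _ _ _ _ h
    have hta : rest.dropWhile pvNonSp = line.toList.drop (i + 1 + (rest.takeWhile pvNonSp).length) := by
      have h2 : line.toList.drop (i + 1 + (rest.takeWhile pvNonSp).length)
          = rest.drop (rest.takeWhile pvNonSp).length := by
        rw [← List.drop_drop (i := (rest.takeWhile pvNonSp).length) (j := i + 1), ← hrest]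
      rw [h2]
      conv_lhs => rw [← List.drop_left (l₁ := rest.takeWhile pvNonSp) (l₂ := rest.dropWhile pvNonSp)]
      rw [List.takeWhile_append_dropWhile]
    have hwsplit : rest = rest.takeWhile pvNonSp ++ rest.dropWhile pvNonSp :=
      (List.takeWhile_append_dropWhile).symm
    have hwnb : ∀ d ∈ rest.takeWhile pvNonSp, PySem.Chars.isspace d = false := by
      intro d hd
      have := List.mem_takeWhile_imp hd
      simpa [pvNonSp] using this
    have htail : rest.dropWhile pvNonSp = [] ∨
        ∃ d t', rest.dropWhile pvNonSp = d :: t' ∧ PySem.Chars.isspace d = true := by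
      cases hdw : rest.dropWhile pvNonSp with
      | nil => exact Or.inl rfl
      | cons d t' =>
        refine Or.inr ⟨d, t', rfl, ?_⟩
        have := List.head_dropWhile_not pvNonSp (l := rest) (by rw [hdw]; simp)
        simp only [hdw, List.head_cons] at this
        simpa [pvNonSp] using this
    have hilt : i < line.toList.length := by
      by_contra hx
      have hz : line.toList.drop i = [] := List.drop_eq_nil_of_le (by omega)
      rw [← h] at hz; simp at hz
    rw [pvBLoop, if_neg hsp, if_neg (by simp), pvTokens, if_neg hsp]
    by_cases hck : count = k
    · rw [if_pos (by simp [hck])]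
      conv_lhs => rw [hwsplit]
      rw [scanWord line k _ _ _ _ _ hwnb (by rw [← hwsplit]; exact hrest) (by omega) htail]
      have hc : 0 ≤ k - count ∧ (k - count).toNat <
          ((i, c :: rest.takeWhile pvNonSp) :: pvTokens (rest.dropWhile pvNonSp) (i + 1 + (rest.takeWhile pvNonSp).length)).length := by
        simp [hck]
      rw [if_pos hc]
      have h0 : (k - count).toNat = 0 := by omega
      rw [h0, List.getD_cons_zero]
      congr 1
      simp only [List.length_cons]; omega
    · rw [if_neg (by simp [hck])]
      conv_lhs => rw [hwsplit]
      rw [scanSkip line k _ _ _ _ hwnb, boundary line k _ _ _ htail]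
      rw [ih hta (count + 1)]
      by_cases hc : 0 ≤ k - (count + 1) ∧ (k - (count + 1)).toNat <
          (pvTokens (rest.dropWhile pvNonSp) (i + 1 + (rest.takeWhile pvNonSp).length)).length
      · rw [if_pos hc]
        have hc2 : 0 ≤ k - count ∧ (k - count).toNat <
            ((i, c :: rest.takeWhile pvNonSp) :: pvTokens (rest.dropWhile pvNonSp) (i + 1 + (rest.takeWhile pvNonSp).length)).length := by
          simp only [List.length_cons]; omega
        rw [if_pos hc2]
        have hidx : (k - count).toNat = (k - (count + 1)).toNat + 1 := by omega
        rw [hidx, List.getD_cons_succ]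
      · rw [if_neg hc]
        have hc2 : ¬ (0 ≤ k - count ∧ (k - count).toNat <
            ((i, c :: rest.takeWhile pvNonSp) :: pvTokens (rest.dropWhile pvNonSp) (i + 1 + (rest.takeWhile pvNonSp).length)).length) := by
          simp only [List.length_cons]; omega
        rw [if_neg hc2]

-- ===== VERDICT (by name: the statement is the Claim_ definition above) =====
theorem highlight_cell_in_line_py_spec : Claim_equal_highlight_cell_in_line_py := by
  intro line k _ hpre
  unfold Spec_highlight_cell_in_line_py
  unfold highlight_cell_in_line_py highlight_cell_in_line_py_alt
  unfold Pre_highlight_cell_in_line_py at hpre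
  have hdrop0 : line.toList = line.toList.drop 0 := rfl
  have hB := bLoop_eq line k line.toList 0 hdrop0 0
  have hparts : PySem.Str.split₀ line = (pvTokens line.toList 0).map fun p => String.ofList p.2 := by
    rw [PySem.Str.split₀, split₀_eq_words, ← tokens_map_snd line.toList 0, List.map_map]
    rfl
  set ts := pvTokens line.toList 0 with hts
  have hlenp : (PySem.Str.split₀ line).length = ts.length := by
    rw [hparts, List.length_map]
  rw [Int.sub_zero] at hB
  rw [hB]
  by_cases hge : k ≥ ((PySem.Str.split₀ line).length : Int)
  · rw [if_pos hge]
    have : ¬ (0 ≤ k ∧ k.toNat < ts.length) := by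
      rw [hlenp] at hge; omega
    rw [if_neg this]
  · rw [if_neg hge]
    have hlc : (PySem.Chars.split₀ line.toList).length = ts.length := by
      rw [split₀_eq_words, ← tokens_map_snd line.toList 0, List.length_map]
    rw [hlenp] at hge
    rw [hlc] at hpre
    by_cases hk0 : 0 ≤ k
    · -- in range: 0 ≤ k < ts.length
      have hklt : k.toNat < ts.length := by omega
      have hget : PySem.List.pyGet? (PySem.Str.split₀ line) k = some ((PySem.Str.split₀ line).getD k.toNat "") := by
        rw [PySem.List.pyGet?_of_nonneg _ hk0,
            List.getElem?_eq_getElem (by rw [hlenp]; omega),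
            List.getD_eq_getElem _ _ (by rw [hlenp]; omega)]
      rw [hget]
      show pvFindLoop line k ((PySem.Str.split₀ line).getD k.toNat "") (PySem.Str.split₀ line) 0 0 = _
      have htarget : ((PySem.Str.split₀ line).getD k.toNat "") = String.ofList (ts.getD k.toNat (0, [])).2 := by
        rw [hparts]
        rw [List.getD_eq_getElem _ _ (by rw [List.length_map]; omega), List.getElem_map,
            List.getD_eq_getElem _ _ (by omega)]
      rw [htarget, hparts]
      have hA := aLoop_eq line k (String.ofList (ts.getD k.toNat (0, [])).2) ts 0 0
        (tokOK_of_drop line.toList line.toList 0 hdrop0)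
      rw [Int.sub_zero] at hA
      rw [show ((0:Nat):Int) = (0:Int) from rfl] at hA
      rw [hA, if_pos ⟨hk0, hklt⟩, if_pos ⟨hk0, hklt⟩]
      congr 1
      simp [PySem.Str.len]
    · -- negative in-range index: both sides return line
      have hneg : ¬ (0 ≤ k ∧ k.toNat < ts.length) := by omega
      rw [if_neg hneg]
      have hnn : PySem.List.pyGet? (PySem.Str.split₀ line) k ≠ none := by
        rw [Ne, PySem.List.pyGet?_eq_none_iff]
        intro hx
        apply hx
        unfold PySem.Raise.InRange
        constructor
        · rw [hlenp]; omega
        · omega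
      cases hget : PySem.List.pyGet? (PySem.Str.split₀ line) k with
      | none => exact absurd hget hnn
      | some target =>
        have hA := aLoop_eq line k target ts 0 0 (tokOK_of_drop line.toList line.toList 0 hdrop0)
        rw [Int.sub_zero] at hA
        rw [show ((0:Nat):Int) = (0:Int) from rfl] at hA
        show pvFindLoop line k target (PySem.Str.split₀ line) 0 0 = line
        rw [hparts, hA, if_neg hneg]

@[simp] theorem highlight_cell_in_line_py_raises : Claim_raises_highlight_cell_in_line_py := by
  unfold Claim_raises_highlight_cell_in_line_py
  constructor
  · intro line k _ hr
    unfold Raises_highlight_cell_in_line_py at hr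
    unfold Pre_highlight_cell_in_line_py
    omega
  · refine ⟨by decide, by decide, by decide⟩
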